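-- pv_equiv track=rewrite | github.com/newseanstation/myopenclawstatus | tmp/snippets.py | snippet
-- ===== SOURCE A (Python) =====
-- def snippet(text, terms, window=200):
--     low = text.lower()
--     for term in terms:
--         i = low.find(term.lower())
--         if i!=-1:
--             a = max(0, i-window)
--             b = min(len(text), i+window)
--             return text[a:b]
--     return text[:400]
-- ===== SOURCE B (Python) =====
-- def snippet(text, terms, window=200):
--     # Single left-to-right scan over the text: at each position, try the terms
--     # that would improve on the best match so far (earlier in the list), and
--     # stop as soon as the first-listed term has matched.
--     low = text.lower()
--     lowered = [t.lower() for t in terms]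
--     best = None  # (term index, match position)
--     for pos in range(len(low)):
--         for j, t in enumerate(lowered):
--             if (best is None or j < best[0]) and low.startswith(t, pos):
--                 best = (j, pos)
--         if best is not None and best[0] == 0:
--             break
--     if best is None:
--         return text[:400]
--     i = best[1]
--     a = max(0, i - window)
--     b = min(len(text), i + window)
--     return text[a:b]
-- ===== Notes on version B (the rewrite author's own statement) =====
-- stated objective: alternative
-- what changed: A runs a separate full substring search (str.find) for each term and returns at the first term that hits; B makes one left-to-right scan over the text, keeping the lowest-list-index term matched so far (trying only terms that would improve it) and stopping as soon as the first-listed term matches.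
import Mathlib
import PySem

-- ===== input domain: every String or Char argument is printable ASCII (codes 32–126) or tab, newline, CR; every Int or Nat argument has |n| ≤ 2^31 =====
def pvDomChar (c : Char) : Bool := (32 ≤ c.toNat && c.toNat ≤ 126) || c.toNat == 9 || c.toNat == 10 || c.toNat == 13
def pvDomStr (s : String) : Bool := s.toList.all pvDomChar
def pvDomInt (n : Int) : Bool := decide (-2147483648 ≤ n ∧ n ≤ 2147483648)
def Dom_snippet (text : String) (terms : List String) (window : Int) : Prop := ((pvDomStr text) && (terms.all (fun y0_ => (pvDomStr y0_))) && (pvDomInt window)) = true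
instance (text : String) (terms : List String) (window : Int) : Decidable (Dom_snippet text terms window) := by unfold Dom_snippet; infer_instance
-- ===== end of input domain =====

-- B replaces A's find-per-term scan by a single left-to-right scan over the text that keeps
-- the lowest-list-index term matched so far, with an early exit (objective: alternative).

-- ===== PORT A =====
def snippetGo (text low : String) (window : Int) : List String → String
  | [] => PySem.Str.slice text none (some 400)
  | term :: rest =>
    let i := PySem.Str.find low (PySem.Str.lower term)
    if i ≠ -1 then
      PySem.Str.slice text (some (max 0 (i - window))) (some (min (PySem.Str.len text) (i + window)))
    else snippetGo text low window rest

def snippet (text : String) (terms : List String) (window : Int) : String :=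
  snippetGo text (PySem.Str.lower text) window terms

-- ===== PORT B =====
-- inner-loop body: `if (best is None or j < best[0]) and low.startswith(t, pos): best = (j, pos)`;
-- low.startswith(t, pos) is ported as prefix-of-drop, exact for 0 ≤ pos (the only positions used)
def altStep (low : String) (pos : Int) (best : Option (Int × Int)) (jt : Int × String) : Option (Int × Int) :=
  if (match best with | none => true | some b => decide (jt.1 < b.1))
      && jt.2.toList.isPrefixOf (low.toList.drop pos.toNat)
  then some (jt.1, pos) else best

-- outer loop over positions with the `break` once best[0] == 0
def altScan (low : String) (ys : List (Int × String)) : Option (Int × Int) → List Int → Option (Int × Int)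
  | best, [] => best
  | best, pos :: rest =>
    match ys.foldl (fun b jt => altStep low pos b jt) best with
    | some b => if b.1 == 0 then some b else altScan low ys (some b) rest
    | none => altScan low ys none rest

def snippet_alt (text : String) (terms : List String) (window : Int) : String :=
  let low := PySem.Str.lower text
  let lowered := terms.map PySem.Str.lower
  let best := altScan low (PySem.List.enumerate lowered 0) none
    (PySem.List.pyRange 0 (PySem.Str.len low) 1)
  match best with
  | none => PySem.Str.slice text none (some 400)
  | some bi =>
    let i := bi.2
    let a := max 0 (i - window)
    let b := min (PySem.Str.len text) (i + window)
    PySem.Str.slice text (some a) (some b)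

-- ===== PRECONDITION & SPEC =====
def Spec_snippet (text : String) (terms : List String) (window : Int) (out : String) : Prop := out = snippet_alt text terms window
instance (text : String) (terms : List String) (window : Int) (out : String) : Decidable (Spec_snippet text terms window out) := by unfold Spec_snippet; infer_instance

-- ===== CLAIM (what is proved, stated in full; the proofs are below) =====
def Claim_equal_snippet : Prop := ∀ (text : String) (terms : List String) (window : Int), Dom_snippet text terms window → Spec_snippet text terms window (snippet text terms window)

-- ===== LEMMAS AND PROOFS =====

-- "first hit from j": for the first already-lowered term occurring in low, its index and find position
def pvFhf (low : String) : List String → Int → Option (Int × Int)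
  | [], _ => none
  | t :: rest, j =>
    if PySem.Str.find low t ≠ -1 then some (j, PySem.Str.find low t) else pvFhf low rest (j + 1)

-- A's scan computes pvFhf and slices accordingly
theorem snippetGo_eq_fhf (text low : String) (window : Int) :
    ∀ (ts : List String) (j : Int),
      snippetGo text low window ts =
        (match pvFhf low (ts.map PySem.Str.lower) j with
          | none => PySem.Str.slice text none (some 400)
          | some m => PySem.Str.slice text (some (max 0 (m.2 - window)))
              (some (min (PySem.Str.len text) (m.2 + window)))) := by
  intro ts
  induction ts with
  | nil => intro j; simp [snippetGo, pvFhf]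
  | cons t rest ih =>
    intro j
    by_cases h : PySem.Chars.find low.toList (PySem.Chars.lower t.toList) = -1
    · simp [snippetGo, pvFhf, h, ih (j + 1)]
    · simp [snippetGo, pvFhf, h]

-- the inner fold never updates once best has term index 0 (all enumerate indices are ≥ 0)
theorem foldl_altStep_id (low : String) (pos : Int) (b : Int × Int) (hb : b.1 = 0) :
    ∀ ys : List (Int × String), (∀ jt ∈ ys, 0 ≤ jt.1) →
      ys.foldl (fun acc jt => altStep low pos acc jt) (some b) = some b := by
  intro ys
  induction ys with
  | nil => intro _; simp
  | cons jt ys ih =>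
    intro h
    have h0 : 0 ≤ jt.1 := h jt List.mem_cons_self
    have : altStep low pos (some b) jt = some b := by
      simp only [altStep, hb]
      have : decide (jt.1 < 0) = false := by simp; omega
      simp [this]
    rw [List.foldl_cons, this]
    exact ih (fun x hx => h x (List.mem_cons_of_mem _ hx))

-- break elimination: altScan is the plain nested fold
theorem altScan_eq_foldl (low : String) (ys : List (Int × String)) (hy : ∀ jt ∈ ys, 0 ≤ jt.1) :
    ∀ (ps : List Int) (acc : Option (Int × Int)),
      altScan low ys acc ps
        = ps.foldl (fun b pos => ys.foldl (fun b jt => altStep low pos b jt) b) acc := by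
  intro ps
  induction ps with
  | nil => intro acc; simp [altScan]
  | cons p ps ih =>
    intro acc
    rw [altScan, List.foldl_cons]
    cases hfold : ys.foldl (fun b jt => altStep low p b jt) acc with
    | none => exact ih none
    | some b =>
      by_cases hb0 : b.1 = 0
      · simp only [hb0, beq_self_eq_true, if_true]
        have : ∀ qs : List Int,
            qs.foldl (fun b pos => ys.foldl (fun b jt => altStep low pos b jt) b) (some b) = some b := by
          intro qs
          induction qs with
          | nil => rfl
          | cons q qs ihq => rw [List.foldl_cons, foldl_altStep_id low q b hb0 ys hy, ihq]
        rw [this ps]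
      · have : (b.1 == 0) = false := by simpa using hb0
        simp only [this, if_false]
        exact ih (some b)

-- nested fold = fold over the flattened candidate list
theorem nested_fold_eq (low : String) (xs : List Int) (ys : List (Int × String)) :
    ∀ acc : Option (Int × Int),
      xs.foldl (fun b pos => ys.foldl (fun b jt => altStep low pos b jt) b) acc
        = (xs.flatMap (fun pos => ys.map (fun jt => (pos, jt)))).foldl
            (fun b c => altStep low c.1 b c.2) acc := by
  induction xs with
  | nil => intro acc; simp
  | cons p ps ih =>
    intro acc
    simp only [List.foldl_cons, List.flatMap_cons, List.foldl_append, List.foldl_map, ih]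

def pvQ (low : String) (c : Int × (Int × String)) : Bool :=
  c.2.2.toList.isPrefixOf (low.toList.drop c.1.toNat)

def pvKey (c : Int × (Int × String)) : Int × Int := (c.2.1, c.1)

-- 'replace best when the new index is strictly smaller'
def pvJmin (b : Option (Int × Int)) (y : Int × Int) : Option (Int × Int) :=
  if (match b with | none => true | some v => decide (y.1 < v.1)) then some y else b

theorem altStep_eq (low : String) (c : Int × (Int × String)) (b : Option (Int × Int)) :
    altStep low c.1 b c.2 = if pvQ low c then pvJmin b (pvKey c) else b := by
  obtain ⟨pos, j, t⟩ := c
  simp only [altStep, pvQ, pvJmin, pvKey]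
  cases b with
  | none =>
    by_cases hq : t.toList.isPrefixOf (low.toList.drop pos.toNat)
    · simp [hq]
    · simp [hq]
  | some v =>
    by_cases hq : t.toList.isPrefixOf (low.toList.drop pos.toNat)
    · by_cases hlt : j < v.1
      · simp [hq, hlt]
      · simp [hq, hlt]
    · simp [hq]

theorem fold_filter_map (low : String) (cs : List (Int × (Int × String))) :
    ∀ acc : Option (Int × Int),
      cs.foldl (fun b c => altStep low c.1 b c.2) acc
        = ((cs.filter (pvQ low)).map pvKey).foldl pvJmin acc := by
  induction cs with
  | nil => intro acc; simp
  | cons c cs ih =>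
    intro acc
    rw [List.foldl_cons, ih, altStep_eq, List.filter_cons]
    by_cases hq : pvQ low c
    · simp [hq]
    · simp [hq]

-- Python tuple comparison (lexicographic on int pairs)
def pvPairLt (p q : Int × Int) : Bool := decide (p.1 < q.1) || (p.1 == q.1 && decide (p.2 < q.2))

def pvOmin (b : Option (Int × Int)) (y : Int × Int) : Option (Int × Int) :=
  if (match b with | none => true | some v => pvPairLt y v) then some y else b

-- on a list whose second components are nondecreasing, index-only replacement = lexicographic replacement
theorem foldl_jmin_eq_omin (zs : List (Int × Int)) (hs : zs.Pairwise (fun x y => x.2 ≤ y.2)) :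
    ∀ acc : Option (Int × Int), (∀ b, acc = some b → ∀ y ∈ zs, b.2 ≤ y.2) →
      zs.foldl pvJmin acc = zs.foldl pvOmin acc := by
  induction zs with
  | nil => intro acc _; rfl
  | cons z zs ih =>
    intro acc hacc
    have hz : ∀ y ∈ zs, z.2 ≤ y.2 := (List.pairwise_cons.mp hs).1
    have hs' := (List.pairwise_cons.mp hs).2
    have hstep : pvJmin acc z = pvOmin acc z := by
      cases acc with
      | none => rfl
      | some v =>
        have hv : v.2 ≤ z.2 := hacc v rfl z List.mem_cons_self
        simp only [pvJmin, pvOmin, pvPairLt]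
        by_cases hlt : z.1 < v.1
        · simp [hlt]
        · have h2 : ¬ z.2 < v.2 := by omega
          by_cases he : z.1 = v.1
          · simp [hlt, he, h2]
          · have : (z.1 == v.1) = false := by simpa using he
            simp [hlt, this]
    rw [List.foldl_cons, List.foldl_cons, hstep]
    apply ih hs'
    intro b hb y hy
    cases acc with
    | none =>
      have : pvOmin none z = some z := rfl
      rw [this] at hb
      cases hb
      exact hz y hy
    | some v =>
      have hv : v.2 ≤ z.2 := hacc v rfl z List.mem_cons_self
      simp only [pvOmin] at hb
      by_cases hr : pvPairLt z v = true
      · rw [if_pos (by simpa using hr)] at hb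
        cases hb
        exact hz y hy
      · rw [if_neg (by simpa using hr)] at hb
        cases hb
        exact le_trans hv (hz y hy)

theorem pvPairLt_irrefl (a : Int × Int) : pvPairLt a a = false := by
  simp [pvPairLt]

theorem pvPairLt_antisymm {a b : Int × Int} (h1 : pvPairLt a b = false) (h2 : pvPairLt b a = false) :
    a = b := by
  simp [pvPairLt] at h1 h2
  obtain ⟨h1a, h1b⟩ := h1
  obtain ⟨h2a, h2b⟩ := h2
  have : a.1 = b.1 := by omega
  have : a.2 = b.2 := by
    have := h1b (by omega)
    have := h2b (by omega)
    omega
  exact Prod.ext ‹a.1 = b.1› ‹a.2 = b.2›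

theorem pvPairLt_trans_false {a b c : Int × Int} (h1 : pvPairLt a b = false)
    (h2 : pvPairLt b c = false) : pvPairLt a c = false := by
  simp [pvPairLt] at h1 h2 ⊢
  constructor
  · omega
  · intro h
    obtain ⟨h1a, h1b⟩ := h1
    obtain ⟨h2a, h2b⟩ := h2
    have hb1 : b.1 = c.1 := by omega
    have := h1b (by omega)
    have := h2b (by omega)
    omega

theorem pvPairLt_lt_of_le {a b c : Int × Int} (h1 : pvPairLt b a = true)
    (h2 : pvPairLt b c = false) : pvPairLt a c = false := by
  simp [pvPairLt] at h1 h2 ⊢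
  obtain ⟨h2a, h2b⟩ := h2
  constructor
  · omega
  · intro h
    rcases h1 with h1 | ⟨h1a, h1b⟩ <;>
    · have := h2b (by omega)
      omega

theorem pvOmin_isSome (acc : Option (Int × Int)) (y : Int × Int) : (pvOmin acc y).isSome := by
  cases acc <;> simp [pvOmin] <;> split_ifs <;> simp

theorem foldl_pvOmin_some (zs : List (Int × Int)) :
    ∀ (acc : Option (Int × Int)) (m : Int × Int), zs.foldl pvOmin acc = some m →
      (m ∈ zs ∨ acc = some m) ∧ (∀ y ∈ zs, pvPairLt y m = false) ∧
        (∀ a, acc = some a → pvPairLt a m = false) := by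
  induction zs with
  | nil =>
    intro acc m h
    simp at h
    refine ⟨Or.inr h, by simp, ?_⟩
    intro a ha
    rw [h] at ha
    cases ha
    exact pvPairLt_irrefl m
  | cons z zs ih =>
    intro acc m h
    simp only [List.foldl_cons] at h
    obtain ⟨hmem, hmin, hacc⟩ := ih (pvOmin acc z) m h
    cases acc with
    | none =>
      have haz : pvOmin none z = some z := by simp [pvOmin]
      rw [haz] at hmem hacc
      have hna' : pvPairLt z m = false := hacc z rfl
      refine ⟨?_, ?_, by simp⟩
      · rcases hmem with h1 | h1
        · exact Or.inl (List.mem_cons_of_mem _ h1)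
        · cases h1; exact Or.inl List.mem_cons_self
      · intro y hy
        rcases List.mem_cons.mp hy with rfl | hy
        · exact hna'
        · exact hmin y hy
    | some v =>
      by_cases hzv : pvPairLt z v = true
      · have haz : pvOmin (some v) z = some z := by simp [pvOmin, hzv]
        rw [haz] at hmem hacc
        have hna' : pvPairLt z m = false := hacc z rfl
        refine ⟨?_, ?_, ?_⟩
        · rcases hmem with h1 | h1
          · exact Or.inl (List.mem_cons_of_mem _ h1)
          · cases h1; exact Or.inl List.mem_cons_self
        · intro y hy
          rcases List.mem_cons.mp hy with rfl | hy
          · exact hna'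
          · exact hmin y hy
        · intro a ha
          cases ha
          exact pvPairLt_lt_of_le hzv hna'
      · simp only [Bool.not_eq_true] at hzv
        have haz : pvOmin (some v) z = some v := by simp [pvOmin, hzv]
        rw [haz] at hmem hacc
        have hnv : pvPairLt v m = false := hacc v rfl
        refine ⟨?_, ?_, ?_⟩
        · rcases hmem with h1 | h1
          · exact Or.inl (List.mem_cons_of_mem _ h1)
          · exact Or.inr h1
        · intro y hy
          rcases List.mem_cons.mp hy with rfl | hy
          · exact pvPairLt_trans_false hzv hnv
          · exact hmin y hy
        · intro a ha
          cases ha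
          exact hnv

theorem foldl_pvOmin_eq_none (zs : List (Int × Int)) :
    ∀ acc, zs.foldl pvOmin acc = none → acc = none ∧ zs = [] := by
  induction zs with
  | nil => intro acc h; exact ⟨by simpa using h, rfl⟩
  | cons z zs ih =>
    intro acc h
    simp only [List.foldl_cons] at h
    obtain ⟨h1, _⟩ := ih _ h
    have := pvOmin_isSome acc z
    rw [h1] at this
    simp at this

theorem foldl_pvOmin_min (zs : List (Int × Int)) (m : Int × Int)
    (hmem : m ∈ zs) (hmin : ∀ y ∈ zs, pvPairLt y m = false) :
    zs.foldl pvOmin none = some m := by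
  cases h : zs.foldl pvOmin none with
  | none =>
    obtain ⟨_, h2⟩ := foldl_pvOmin_eq_none zs none h
    rw [h2] at hmem; simp at hmem
  | some m' =>
    obtain ⟨hmem', hmin', _⟩ := foldl_pvOmin_some zs none m' h
    have hm'zs : m' ∈ zs := by
      rcases hmem' with h1 | h1
      · exact h1
      · simp at h1
    have := pvPairLt_antisymm (hmin m' hm'zs) (hmin' m hmem)
    rw [this]

theorem pvFhf_eq_none_iff (low : String) :
    ∀ (lts : List String) (j : Int),
      pvFhf low lts j = none ↔ ∀ t ∈ lts, PySem.Str.find low t = -1 := by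
  intro lts
  induction lts with
  | nil => intro j; simp [pvFhf]
  | cons t rest ih =>
    intro j
    by_cases h : PySem.Chars.find low.toList t.toList = -1
    · simp [pvFhf, h, ih (j + 1)]
    · simp [pvFhf, h]

theorem pvFhf_eq_some (low : String) :
    ∀ (lts : List String) (j : Int) (m : Int × Int), pvFhf low lts j = some m →
      ∃ (a : Nat), ∃ (_ : a < lts.length),
        m = (j + a, PySem.Str.find low lts[a]) ∧ PySem.Str.find low lts[a] ≠ -1 ∧
          ∀ (b : Nat) (_ : b < lts.length), b < a → PySem.Str.find low lts[b] = -1 := by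
  intro lts
  induction lts with
  | nil => intro j m h; simp [pvFhf] at h
  | cons t rest ih =>
    intro j m h
    by_cases hf : PySem.Chars.find low.toList t.toList = -1
    · simp [pvFhf, hf] at h
      obtain ⟨a, ha, hm, hne, hprev⟩ := ih (j + 1) m h
      refine ⟨a + 1, by simpa using ha, ?_, by simpa using hne, ?_⟩
      · rw [hm]
        simp only [List.getElem_cons_succ]
        congr 1
        push_cast
        ring
      · intro b hb hba
        cases b with
        | zero => simpa [PySem.Str.find_eq] using hf
        | succ b => simpa using hprev b (by simpa using hb) (by omega)
    · simp [pvFhf, hf] at h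
      refine ⟨0, by simp, ?_, by simpa [PySem.Str.find_eq] using hf, by omega⟩
      simp [PySem.Str.find_eq, ← h]

-- the match condition pvQ as a prefix statement
theorem pvQ_iff (low : String) (pos : Int) (j : Int) (t : String) :
    pvQ low (pos, j, t) = true ↔ t.toList <+: low.toList.drop pos.toNat := by
  simp only [pvQ]
  exact List.isPrefixOf_iff_prefix

theorem find_ne_of_prefix_drop (low t : String) (p : Nat)
    (h : t.toList <+: low.toList.drop p) : PySem.Str.find low t ≠ -1 := by
  rw [PySem.Str.find_eq, Ne, PySem.Chars.find_eq_neg_one_iff]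
  push_neg
  rw [List.infix_iff_prefix_suffix]
  exact ⟨low.toList.drop p, h, List.drop_suffix p low.toList⟩

-- membership in B's candidate list (positions 0 ≤ p < len low)
theorem mem_cands (low : String) (lts : List String) (z : Int × Int) :
    z ∈ (((PySem.List.pyRange 0 (PySem.Str.len low) 1).flatMap
            (fun pos => (PySem.List.enumerate lts 0).map (fun jt => (pos, jt)))).filter
          (pvQ low)).map pvKey ↔
      ∃ (p : Int) (a : Nat), ∃ (_ : a < lts.length),
        z = ((a : Int), p) ∧ 0 ≤ p ∧ p < (low.toList.length : Int) ∧
          (lts[a]).toList <+: low.toList.drop p.toNat := by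
  constructor
  · intro hz
    rw [List.mem_map] at hz
    obtain ⟨c, hcf, rfl⟩ := hz
    rw [List.mem_filter] at hcf
    obtain ⟨hcm, hq⟩ := hcf
    rw [List.mem_flatMap] at hcm
    obtain ⟨pos, hpos, hc⟩ := hcm
    rw [PySem.List.mem_pyRange_one] at hpos
    rw [List.mem_map] at hc
    obtain ⟨ja, hja, rfl⟩ := hc
    rw [PySem.List.enumerate_eq_zipIdx_map, List.mem_map] at hja
    obtain ⟨⟨t, a⟩, hza, rfl⟩ := hja
    obtain ⟨_, ha2, ht⟩ := List.mem_zipIdx hza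
    simp only [Nat.sub_zero] at ht
    rw [pvQ_iff low pos _ _] at hq
    refine ⟨pos, a, by omega, by simp [pvKey], hpos.1, ?_, by simpa [ht] using hq⟩
    have := hpos.2
    rw [PySem.Str.len_eq] at this
    omega
  · rintro ⟨p, a, ha, rfl, hp0, hpn, hpre⟩
    rw [List.mem_map]
    refine ⟨(p, ((0 : Int) + (a : Int), lts[a])), ?_, by simp [pvKey]⟩
    rw [List.mem_filter]
    constructor
    · rw [List.mem_flatMap]
      refine ⟨p, ?_, ?_⟩
      · rw [PySem.List.mem_pyRange_one, PySem.Str.len_eq]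
        omega
      · rw [List.mem_map]
        refine ⟨((0 : Int) + (a : Int), lts[a]), ?_, rfl⟩
        rw [PySem.List.enumerate_eq_zipIdx_map, List.mem_map]
        refine ⟨(lts[a], a), ?_, rfl⟩
        rw [List.mem_zipIdx_iff_getElem?]
        simp [ha]
    · rw [pvQ_iff low p _ _]
      exact hpre

theorem pvPairLt_eq_false_iff (y m : Int × Int) :
    pvPairLt y m = false ↔ m.1 < y.1 ∨ (y.1 = m.1 ∧ m.2 ≤ y.2) := by
  simp only [pvPairLt, Bool.or_eq_false_iff, Bool.and_eq_false_iff,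
    decide_eq_false_iff_not, not_lt, beq_eq_false_iff_ne]
  constructor
  · rintro ⟨h1, h2 | h2⟩ <;> omega
  · intro h
    constructor
    · omega
    · by_cases he : y.1 = m.1
      · right; omega
      · left; exact he

-- position-major flatMap is nondecreasing in the position component
theorem flatMap_pairwise (ys : List (Int × String)) :
    ∀ ps : List Int, ps.Pairwise (· ≤ ·) →
      (ps.flatMap (fun pos => ys.map (fun jt => (pos, jt)))).Pairwise
        (fun c c' : Int × (Int × String) => c.1 ≤ c'.1) := by
  intro ps
  induction ps with
  | nil => intro _; simp
  | cons p ps ih =>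
    intro hle
    obtain ⟨hp, hps⟩ := List.pairwise_cons.mp hle
    rw [List.flatMap_cons, List.pairwise_append]
    refine ⟨?_, ih hps, ?_⟩
    · rw [List.pairwise_map]
      exact List.pairwise_of_forall (fun _ _ => le_refl p)
    · intro x hx y hy
      rw [List.mem_map] at hx
      obtain ⟨_, _, rfl⟩ := hx
      rw [List.mem_flatMap] at hy
      obtain ⟨q, hq, hy⟩ := hy
      rw [List.mem_map] at hy
      obtain ⟨_, _, rfl⟩ := hy
      exact hp q hq

-- the candidate key list is nondecreasing in position (second component)
theorem cands_sorted (low : String) (lts : List String) :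
    ((((PySem.List.pyRange 0 (PySem.Str.len low) 1).flatMap
        (fun pos => (PySem.List.enumerate lts 0).map (fun jt => (pos, jt)))).filter
      (pvQ low)).map pvKey).Pairwise (fun x y => x.2 ≤ y.2) := by
  rw [List.pairwise_map]
  apply List.Pairwise.filter
  exact flatMap_pairwise (PySem.List.enumerate lts 0) _
    ((PySem.List.pairwise_lt_pyRange_one 0 (PySem.Str.len low)).imp (fun h => le_of_lt h))

-- every slice of the empty string is empty
theorem slice_empty (a b : Option Int) : PySem.Str.slice "" a b = "" := by
  rw [← String.toList_inj, PySem.Str.toList_slice]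
  simp [PySem.Chars.slice_eq_listSlice, PySem.List.slice]

-- ===== VERDICT (by name: the statement is the Claim_ definition above) =====
theorem snippet_spec : Claim_equal_snippet := by
  intro text terms window _
  unfold Spec_snippet
  unfold snippet snippet_alt
  rw [snippetGo_eq_fhf text (PySem.Str.lower text) window terms 0]
  simp only
  set low := PySem.Str.lower text with hlow
  set lts := terms.map PySem.Str.lower with hlts
  have hyidx : ∀ jt ∈ PySem.List.enumerate lts 0, 0 ≤ jt.1 := by
    intro jt hjt
    rw [PySem.List.mem_enumerate_iff] at hjt
    obtain ⟨k, _, rfl⟩ := hjt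
    positivity
  rw [altScan_eq_foldl low _ hyidx, nested_fold_eq, fold_filter_map]
  set cands := ((((PySem.List.pyRange 0 (PySem.Str.len low) 1).flatMap
      (fun pos => (PySem.List.enumerate lts 0).map (fun jt => (pos, jt)))).filter
      (pvQ low)).map pvKey) with hcands
  rw [foldl_jmin_eq_omin cands (hcands ▸ cands_sorted low lts) none (by simp)]
  by_cases htext : text = ""
  · -- empty text: every branch on both sides is a slice of "" and hence ""
    subst htext
    have hcnil : cands = [] := by
      rw [hcands]
      have : PySem.Str.len low = 0 := by
        rw [PySem.Str.len_eq, hlow]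
        decide
      simp [this, PySem.List.pyRange_one_eq_nil]
    rw [hcnil]
    simp only [List.foldl_nil]
    cases pvFhf low lts 0 with
    | none => simp [slice_empty]
    | some m => simp [slice_empty]
  · have htlen : 0 < low.toList.length := by
      rw [hlow, PySem.Str.toList_lower, PySem.Chars.lower, List.length_map]
      have : text.toList ≠ [] := fun h => htext (String.toList_inj.mp (by simpa using h))
      cases h : text.toList with
      | nil => exact absurd h this
      | cons c cs => simp [h]
    cases hfhf : pvFhf low lts 0 with
    | none =>
      rw [pvFhf_eq_none_iff] at hfhf
      have hempty : cands = [] := by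
        rw [List.eq_nil_iff_forall_not_mem]
        intro z hz
        rw [hcands, mem_cands] at hz
        obtain ⟨p, a, ha, rfl, _, _, hpre⟩ := hz
        exact find_ne_of_prefix_drop low lts[a] p.toNat hpre (hfhf lts[a] (List.getElem_mem ha))
      rw [hempty]
      simp
    | some m =>
      obtain ⟨a, ha, hm, hne, hprev⟩ := pvFhf_eq_some low lts 0 m hfhf
      set i0 := PySem.Str.find low lts[a] with hi0
      have hi0nn : 0 ≤ i0 := by
        have h1 := PySem.Chars.neg_one_le_find low.toList (lts[a]).toList
        rw [← PySem.Str.find_eq, ← hi0] at h1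
        omega
      have hfeq : PySem.Str.find low lts[a] = PySem.Chars.find low.toList (lts[a]).toList :=
        PySem.Str.find_eq _ _
      have hspec := PySem.Chars.find_spec (s := low.toList) (sub := (lts[a]).toList)
        (by rw [← hfeq, ← hi0]; exact hi0nn)
      rw [← hfeq, ← hi0] at hspec
      have hi0lt : i0 < (low.toList.length : Int) := by
        by_cases hempty : (lts[a]).toList = []
        · -- empty term: find = 0
          have : i0 = 0 := by
            rw [hi0, hfeq, hempty, PySem.Chars.find_nil]
          omega
        · -- nonempty term is a prefix of drop i0.toNat, so that drop is nonempty
          have h1 := hspec.1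
          have h2 : low.toList.drop i0.toNat ≠ [] := by
            intro hd
            rw [hd, List.prefix_nil] at h1
            exact hempty h1
          have h3 : i0.toNat < low.toList.length := by
            by_contra hge
            push_neg at hge
            exact h2 (List.drop_eq_nil_of_le hge)
          omega
      have hmin : ∀ y ∈ cands, pvPairLt y ((a : Int), i0) = false := by
        intro y hy
        rw [hcands, mem_cands] at hy
        obtain ⟨p, a', ha', rfl, hp0, hpn, hpre⟩ := hy
        rw [pvPairLt_eq_false_iff]
        rcases Nat.lt_trichotomy a' a with hlt | heq | hgt
        · exact absurd (find_ne_of_prefix_drop low lts[a'] p.toNat hpre)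
            (by simpa using hprev a' ha' hlt)
        · subst heq
          right
          refine ⟨rfl, ?_⟩
          show i0 ≤ p
          by_contra hpi
          push_neg at hpi
          exact hspec.2 p.toNat (by omega) hpre
        · left
          show (a : Int) < (a' : Int)
          exact_mod_cast hgt
      have hmem : ((a : Int), i0) ∈ cands := by
        rw [hcands, mem_cands]
        exact ⟨i0, a, ha, rfl, hi0nn, hi0lt, hspec.1⟩
      rw [foldl_pvOmin_min cands ((a : Int), i0) hmem hmin, hm]
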